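-- pv_equiv track=rewrite | github.com/xlhuang1/interview_prep | string_anagrams.py | generate_anagram_tuple
-- ===== SOURCE A (Python) =====
-- def generate_anagram_tuple(str):
--     char_hash = {}
--     for char in str:
--         if char_hash.get(char) is not None:
--             char_hash[char] = char_hash.get(char) + 1
--         else:
--             char_hash[char] = 1
--     return tuple(sorted(char_hash.items()))
-- ===== SOURCE B (Python) =====
-- def generate_anagram_tuple(str):
--     chars = sorted(str)
--     out = []
--     i = 0
--     n = len(chars)
--     while i < n:
--         j = i
--         while j < n and chars[j] == chars[i]:
--             j += 1
--         out.append((chars[i], j - i))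
--         i = j
--     return tuple(out)
-- ===== Notes on version B (the rewrite author's own statement) =====
-- stated objective: alternative
-- what changed: B sorts the characters first and then run-length encodes the sorted sequence with a two-pointer scan, emitting (char, run length) per run, instead of A's hash-counting loop followed by sorting the dict items.
import Mathlib
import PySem

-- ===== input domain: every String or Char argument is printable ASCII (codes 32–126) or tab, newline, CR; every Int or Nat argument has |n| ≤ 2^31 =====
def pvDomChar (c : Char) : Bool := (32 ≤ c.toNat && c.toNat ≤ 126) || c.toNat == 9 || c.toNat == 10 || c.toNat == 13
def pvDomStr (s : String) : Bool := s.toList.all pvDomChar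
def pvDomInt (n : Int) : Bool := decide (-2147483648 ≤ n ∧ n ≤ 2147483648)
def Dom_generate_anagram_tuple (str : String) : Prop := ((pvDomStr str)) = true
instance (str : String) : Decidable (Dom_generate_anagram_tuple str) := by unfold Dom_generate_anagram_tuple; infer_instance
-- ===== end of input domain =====

-- ===== PORT A =====
-- B sorts the characters and run-length encodes the sorted sequence with a two-pointer
-- scan, instead of A's hash-counting loop followed by sorting the dict items
-- (objective: alternative). Python's one-character strings (the dict keys) are Char here,
-- wrapped into one-character Strings in the returned pairs.
def generate_anagram_tuple (str : String) : List (String × Int) :=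
  let char_hash : PySem.Dict Char Int :=
    str.toList.foldl (fun d char =>
      match d.get? char with                 -- char_hash.get(char) is not None
      | some v => d.insert char (v + 1)      -- char_hash[char] = char_hash.get(char) + 1
      | none   => d.insert char 1) PySem.Dict.empty
  -- tuple(sorted(char_hash.items())): Python sorts the (key, value) tuples lexicographically
  (PySem.List.sorted2 char_hash.items (fun p => p.1) (fun p => p.2) false).map
    (fun p => (String.ofList [p.1], p.2))

-- ===== PORT B =====
-- outer while loop of Source B: emit (chars[i], j - i) where j advances while chars[j] == chars[i]
def pvRleRuns (l : List Char) : List (String × Int) :=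
  match l with
  | [] => []
  | c :: rest =>
      -- inner while: j advances over the run of characters equal to chars[i]
      (String.ofList [c], ((1 + (rest.takeWhile (fun d => d == c)).length : Nat) : Int))
        :: pvRleRuns (rest.dropWhile (fun d => d == c))
termination_by l.length
decreasing_by
  exact Nat.lt_succ_of_le (List.length_dropWhile_le _ _)

def generate_anagram_tuple_alt (str : String) : List (String × Int) :=
  pvRleRuns (PySem.List.sorted str.toList (fun c => c) false)   -- chars = sorted(str)

-- ===== PRECONDITION & SPEC =====
def Spec_generate_anagram_tuple (str : String) (out : List (String × Int)) : Prop := out = generate_anagram_tuple_alt str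
instance (str : String) (out : List (String × Int)) : Decidable (Spec_generate_anagram_tuple str out) := by unfold Spec_generate_anagram_tuple; infer_instance

-- ===== CLAIM (what is proved, stated in full; the proofs are below) =====
def Claim_equal_generate_anagram_tuple : Prop := ∀ (str : String), Dom_generate_anagram_tuple str → Spec_generate_anagram_tuple str (generate_anagram_tuple str)

-- ===== LEMMAS AND PROOFS =====

-- insertBy only evaluates `before x y` at elements y of the accumulator
theorem insertBy_congr {α : Type} (b₁ b₂ : α → α → Bool) (x : α) :
    ∀ (acc : List α), (∀ y ∈ acc, b₁ x y = b₂ x y) →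
      PySem.List.insertBy b₁ x acc = PySem.List.insertBy b₂ x acc := by
  intro acc
  induction acc with
  | nil => intro _; rfl
  | cons y ys ih =>
    intro h
    simp only [PySem.List.insertBy, h y (by simp)]
    split
    · rfl
    · have := ih (fun z hz => h z (by simp [hz]))
      simpa [PySem.List.insertBy] using this

-- a fold of insertBy over xs only compares elements drawn from xs
theorem foldl_insertBy_congr {α : Type} (b₁ b₂ : α → α → Bool) (xs : List α) :
    ∀ (acc : List α), (∀ x ∈ xs, ∀ y, (y ∈ acc ∨ y ∈ xs) → b₁ x y = b₂ x y) →
      xs.foldl (fun acc x => PySem.List.insertBy b₁ x acc) acc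
        = xs.foldl (fun acc x => PySem.List.insertBy b₂ x acc) acc := by
  induction xs with
  | nil => intro _ _; rfl
  | cons x t ih =>
    intro acc h
    simp only [List.foldl_cons]
    rw [insertBy_congr b₁ b₂ x acc (fun y hy => h x (by simp) y (Or.inl hy))]
    apply ih
    intro z hz y hy
    apply h z (by simp [hz])
    rcases hy with hy | hy
    · rw [PySem.List.mem_insertBy] at hy
      rcases hy with rfl | hy
      · exact Or.inr (by simp)
      · exact Or.inl hy
    · exact Or.inr (by simp [hy])

-- with pairwise-distinct first components Python's lexicographic tuple sort is the sort by key
theorem sorted2_eq_sorted_fst (xs : List (Char × Int))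
    (hinj : ∀ a ∈ xs, ∀ b ∈ xs, a.1 = b.1 → a = b) :
    PySem.List.sorted2 xs (fun p => p.1) (fun p => p.2) false
      = PySem.List.sorted xs (fun p => p.1) false := by
  rw [PySem.List.sorted_eq_foldl_insertBy]
  show List.foldl (fun acc x => PySem.List.insertBy _ x acc) [] xs = _
  apply foldl_insertBy_congr
  intro a ha y hy
  have hy' : y ∈ xs := hy.resolve_left (by simp)
  rcases lt_trichotomy a.1 y.1 with h | h | h
  · simp [h, asymm h]
  · have : a = y := hinj a ha y hy' h
    subst this
    simp
  · simp [h, asymm h]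

-- A's result is the canonical form: sorted distinct characters, each paired with its count
theorem A_eq_canon (str : String) :
    generate_anagram_tuple str
      = (PySem.List.sorted (PySem.Set.ofList str.toList) (fun c => c) false).map
          (fun c => (String.ofList [c], (str.toList.count c : Int))) := by
  unfold generate_anagram_tuple
  have hfold : str.toList.foldl (fun d char =>
      match d.get? char with
      | some v => d.insert char (v + 1)
      | none   => d.insert char 1) (PySem.Dict.empty : PySem.Dict Char Int)
      = PySem.Dict.counter str.toList := by
    rw [← PySem.Dict.foldl_insert_getD_add_one_eq_counter]
    apply PySem.List.foldl_congr_mem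
    intro d c _
    cases h : d.get? c with
    | none => simp [PySem.Dict.getD_eq_get?_getD, h]
    | some v => simp [PySem.Dict.getD_eq_get?_getD, h]
  simp only [hfold]
  have hitems := PySem.Dict.items_counter str.toList
  have hnodup : (PySem.Set.ofList str.toList).Nodup := PySem.Set.nodup_ofList _
  have hinj : ∀ a ∈ (PySem.Dict.counter str.toList).items,
      ∀ b ∈ (PySem.Dict.counter str.toList).items, a.1 = b.1 → a = b := by
    rw [hitems]
    intro a ha b hb hab
    rcases List.mem_map.mp ha with ⟨k₁, _, rfl⟩
    rcases List.mem_map.mp hb with ⟨k₂, _, rfl⟩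
    simp only at hab
    subst hab
    rfl
  rw [sorted2_eq_sorted_fst _ hinj]
  have hsorted : PySem.List.sorted (PySem.Dict.counter str.toList).items (fun p => p.1) false
      = (PySem.List.sorted (PySem.Set.ofList str.toList) (fun c => c) false).map
          (fun k => (k, (str.toList.count k : Int))) := by
    apply PySem.List.sorted_eq_of_perm_of_pairwise_lt
    · rw [hitems]
      exact (PySem.List.sorted_perm _ _ _).map _
    · have hle := PySem.List.sorted_pairwise (PySem.Set.ofList str.toList) (fun c => c)
      have hnd : (PySem.List.sorted (PySem.Set.ofList str.toList) (fun c => c) false).Nodup :=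
        ((PySem.List.sorted_perm _ _ _).nodup_iff).mpr hnodup
      rw [List.pairwise_map]
      exact (hle.and hnd).imp (fun h => lt_of_le_of_ne h.1 h.2)
  rw [hsorted, List.map_map]
  rfl

-- every element of the dropWhile (== c) suffix of a sorted tail is strictly above c
theorem mem_drop_gt (c : Char) : ∀ (rest : List Char),
    rest.Pairwise (· ≤ ·) → (∀ x ∈ rest, c ≤ x) →
    ∀ x ∈ rest.dropWhile (fun d => d == c), c < x := by
  intro rest
  induction rest with
  | nil => intro _ _ x hx; simp at hx
  | cons a rs ih =>
    intro hp hge x hx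
    rw [List.dropWhile_cons] at hx
    by_cases hac : a = c
    · rw [if_pos (by simp [hac])] at hx
      exact ih (List.pairwise_cons.mp hp).2 (fun y hy => hge y (by simp [hy])) x hx
    · rw [if_neg (by simp [hac])] at hx
      have hca : c < a := lt_of_le_of_ne (hge a (by simp)) (Ne.symm hac)
      rcases List.mem_cons.mp hx with rfl | hx
      · exact hca
      · exact lt_of_lt_of_le hca ((List.pairwise_cons.mp hp).1 x hx)

-- run-length encoding of a sorted character list is the canonical distinct-chars-with-counts map
theorem rle_canon : ∀ (l : List Char), l.Pairwise (· ≤ ·) →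
    pvRleRuns l
      = (PySem.List.sorted (PySem.Set.ofList l) (fun c => c) false).map
          (fun c => (String.ofList [c], (l.count c : Int))) := by
  intro l
  induction l using pvRleRuns.induct with
  | case1 => intro _; rw [pvRleRuns]; rfl
  | case2 c rest ih =>
    intro hp
    have hge : ∀ x ∈ rest, c ≤ x := (List.pairwise_cons.mp hp).1
    have hrest : rest.Pairwise (· ≤ ·) := (List.pairwise_cons.mp hp).2
    set drop := rest.dropWhile (fun d => d == c) with hdropdef
    have hdropgt : ∀ x ∈ drop, c < x := mem_drop_gt c rest hrest hge
    have hdp : drop.Pairwise (· ≤ ·) :=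
      List.Pairwise.sublist (List.dropWhile_sublist _) hrest
    have hrec := ih hdp
    -- the take part is all c's
    have htake : ∀ x ∈ rest.takeWhile (fun d => d == c), x = c := by
      intro x hx
      have := List.mem_takeWhile_imp hx
      simpa using this
    have hsplit : rest = rest.takeWhile (fun d => d == c) ++ drop :=
      (List.takeWhile_append_dropWhile).symm
    -- counts
    have hcount_c : (c :: rest).count c
        = 1 + (rest.takeWhile (fun d => d == c)).length := by
      have h1 : (rest.takeWhile (fun d => d == c)).count c
          = (rest.takeWhile (fun d => d == c)).length :=
        List.count_eq_length.mpr (fun x hx => ((htake x hx).symm ▸ rfl))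
      have h2 : drop.count c = 0 :=
        List.count_eq_zero.mpr (fun hc => lt_irrefl c (hdropgt c hc))
      rw [List.count_cons_self]
      conv_lhs => rw [hsplit]
      rw [List.count_append, h1, h2]
      omega
    have hcount_x : ∀ x, c < x → (c :: rest).count x = drop.count x := by
      intro x hx
      have h1 : (rest.takeWhile (fun d => d == c)).count x = 0 :=
        List.count_eq_zero.mpr (fun hc => absurd (htake x hc) (ne_of_lt hx).symm)
      rw [List.count_cons_of_ne (ne_of_lt hx)]
      conv_lhs => rw [hsplit]
      rw [List.count_append, h1]
      omega
    -- sorted set of c :: rest = c :: sorted set of drop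
    have hmemdrop : ∀ x, x ∈ drop ↔ (x ∈ rest ∧ x ≠ c) := by
      intro x
      constructor
      · intro hx
        exact ⟨(List.dropWhile_sublist _).subset hx, (ne_of_lt (hdropgt x hx)).symm⟩
      · rintro ⟨hx, hne⟩
        rw [hsplit] at hx
        rcases List.mem_append.mp hx with h | h
        · exact absurd (htake x h) hne
        · exact h
    have hset : PySem.List.sorted (PySem.Set.ofList (c :: rest)) (fun x => x) false
        = c :: PySem.List.sorted (PySem.Set.ofList drop) (fun x => x) false := by
      apply PySem.List.sorted_eq_of_perm_of_pairwise_lt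
      · -- permutation: both nodup with the same membership
        apply List.perm_of_nodup_nodup_toFinset_eq
        · apply List.nodup_cons.mpr
          refine ⟨?_, ?_⟩
          · intro hcmem
            have : c ∈ drop := (PySem.Set.mem_ofList _ _).mp
              ((PySem.List.sorted_perm _ _ _).mem_iff.mp hcmem)
            exact lt_irrefl c (hdropgt c this)
          · exact ((PySem.List.sorted_perm _ _ _).nodup_iff).mpr (PySem.Set.nodup_ofList _)
        · exact PySem.Set.nodup_ofList _
        · ext x
          simp only [List.mem_toFinset, List.mem_cons, PySem.List.mem_sorted,
            PySem.Set.mem_ofList, hmemdrop]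
          by_cases hxc : x = c
          · simp [hxc]
          · simp [hxc]
      · rw [List.pairwise_cons]
        refine ⟨?_, ?_⟩
        · intro x hx
          have : x ∈ drop := (PySem.Set.mem_ofList _ _).mp
            ((PySem.List.sorted_perm _ _ _).mem_iff.mp hx)
          exact hdropgt x this
        · exact PySem.List.sorted_ofList_pairwise_lt _
    show pvRleRuns (c :: rest) = _
    rw [pvRleRuns, hset, hrec, List.map_cons]
    congr 1
    · rw [hcount_c]
    · apply List.map_congr_left
      intro x hx
      have hxd : x ∈ drop := (PySem.Set.mem_ofList _ _).mp
        ((PySem.List.sorted_perm _ _ _).mem_iff.mp hx)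
      rw [hcount_x x (hdropgt x hxd)]

theorem main_eq (str : String) :
    generate_anagram_tuple str = generate_anagram_tuple_alt str := by
  rw [A_eq_canon]
  unfold generate_anagram_tuple_alt
  set sl := PySem.List.sorted str.toList (fun c => c) false with hsl
  have hperm : sl.Perm str.toList := PySem.List.sorted_perm _ _ _
  rw [rle_canon sl (PySem.List.sorted_pairwise _ _)]
  have hsets : PySem.List.sorted (PySem.Set.ofList str.toList) (fun c => c) false
      = PySem.List.sorted (PySem.Set.ofList sl) (fun c => c) false := by
    apply PySem.List.sorted_eq_sorted_of_perm _ _ _ (fun a b h => h)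
    apply List.perm_of_nodup_nodup_toFinset_eq (PySem.Set.nodup_ofList _)
      (PySem.Set.nodup_ofList _)
    ext x
    simp only [List.mem_toFinset, PySem.Set.mem_ofList, hperm.mem_iff]
  rw [hsets]
  apply List.map_congr_left
  intro x _
  rw [hperm.count_eq]

-- ===== VERDICT (by name: the statement is the Claim_ definition above) =====
theorem generate_anagram_tuple_spec : Claim_equal_generate_anagram_tuple := by
  intro str _
  exact main_eq str
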